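-- pv_equiv track=rewrite | github.com/canfieldjuan/finetunelab.ai | scripts/generate_repo_faq.py | extract_section_blocks
-- ===== SOURCE A (Python) =====
-- from typing import List, Dict, Tuple
--
-- SECTION_KEYS = ["requestBody:", "parameters:", "responses:", "security:", "description:", "tags:"]
--
-- def extract_section_blocks(comment_block: str) -> Dict[str, str]:
--     """Extract coarse swagger-like sections from a comment block by string slicing.
--     Returns dict of section_name -> text chunk.
--     """
--     sections: Dict[str, str] = {}
--     if not comment_block:
--         return sections
--     lower = comment_block
--     for key in SECTION_KEYS:
--         pos = lower.find(key)
--         if pos == -1: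
--             continue
--         # find the next section key after current pos
--         next_positions = [lower.find(k, pos + 1) for k in SECTION_KEYS if k != key and lower.find(k, pos + 1) != -1]
--         next_pos = min(next_positions) if next_positions else -1
--         chunk = lower[pos: next_pos] if next_pos != -1 else lower[pos:]
--         sections[key.rstrip(":")] = chunk.strip()
--     return sections
-- ===== SOURCE B (Python) =====
-- SECTION_KEYS = ["requestBody:", "parameters:", "responses:", "security:", "description:", "tags:"]
--
-- def extract_section_blocks(comment_block: str):
--     """Single left-to-right scan: build one position-ordered index of every key
--     occurrence, then read each section's start and cut point off that index."""
--     sections = {}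
--     if not comment_block:
--         return sections
--     marks = [(i, k)
--              for i in range(len(comment_block))
--              for k in SECTION_KEYS
--              if comment_block.startswith(k, i)]
--     for key in SECTION_KEYS:
--         ms = [q for q, k in marks if k == key]
--         if not ms:
--             continue
--         p = ms[0]
--         cut = next((q for q, k in marks if q > p and k != key), None)
--         chunk = comment_block[p:cut] if cut is not None else comment_block[p:]
--         sections[key.rstrip(":")] = chunk.strip()
--     return sections
-- ===== Notes on version B (the rewrite author's own statement) =====
-- stated objective: alternative
-- what changed: A re-runs string.find for every (key, other-key) pair to locate each section's cut point; B builds one position-ordered index of all key occurrences in a single left-to-right scan and reads each section's start and cut point off that index.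
import Mathlib
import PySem

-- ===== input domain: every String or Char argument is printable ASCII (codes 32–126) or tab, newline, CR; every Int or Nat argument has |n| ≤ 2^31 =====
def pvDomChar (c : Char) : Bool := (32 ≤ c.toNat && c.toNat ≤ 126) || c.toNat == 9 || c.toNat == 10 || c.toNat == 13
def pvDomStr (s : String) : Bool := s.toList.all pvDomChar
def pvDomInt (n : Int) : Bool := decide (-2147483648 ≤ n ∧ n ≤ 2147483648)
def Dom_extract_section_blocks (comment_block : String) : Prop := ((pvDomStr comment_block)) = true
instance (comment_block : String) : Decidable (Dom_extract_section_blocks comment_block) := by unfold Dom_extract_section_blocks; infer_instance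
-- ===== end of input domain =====

-- B replaces A's per-key-pair repeated find calls by one position-ordered index of all key
-- occurrences, read once per key for the start and the cut point (objective: alternative).

-- ===== PORT A =====
def SECTION_KEYS : List String :=
  ["requestBody:", "parameters:", "responses:", "security:", "description:", "tags:"]

-- hand port of Python's key.rstrip(":") (PySem has no rstrip-with-chars): drop trailing ':' chars; exact
def rstripColon (k : String) : String :=
  String.ofList ((k.toList.reverse.dropWhile (fun c => c == ':')).reverse)

-- A's loop body, named so the proofs can speak about one iteration
def extract_step (lower : String) (secs : PySem.Dict String String) (key : String) :
    PySem.Dict String String :=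
  let pos := PySem.Str.find lower key
  if pos = -1 then secs
  else
    let next_positions :=
      (SECTION_KEYS.filter
        (fun k => (k != key) && (PySem.Str.findFrom lower k (pos + 1) != -1))).map
        (fun k => PySem.Str.findFrom lower k (pos + 1))
    let next_pos := if next_positions.isEmpty then (-1 : Int)
                    else (PySem.List.min? next_positions (fun x => x)).getD (-1)
    let chunk := if next_pos ≠ -1 then PySem.Str.slice lower (some pos) (some next_pos)
                 else PySem.Str.slice lower (some pos) none
    secs.insert (rstripColon key) (PySem.Str.strip chunk)

def extract_section_blocks (comment_block : String) : List (String × String) :=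
  if comment_block = "" then (PySem.Dict.empty : PySem.Dict String String).items
  else (SECTION_KEYS.foldl (extract_step comment_block)
          (PySem.Dict.empty : PySem.Dict String String)).items

-- ===== PORT B =====
-- Python B's `marks` comprehension: every key occurrence as one position-ordered index;
-- `comment_block.startswith(k, i)` ported as a prefix test on the dropped char list (exact for 0 ≤ i < len)
def marksOf (comment_block : String) : List (Int × String) :=
  (List.range comment_block.toList.length).flatMap (fun i =>
    (SECTION_KEYS.filter
      (fun k => PySem.Chars.startswith (comment_block.toList.drop i) k.toList)).map
      (fun k => ((i : Int), k)))

-- B's loop body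
def extract_step_alt (comment_block : String) (marks : List (Int × String))
    (secs : PySem.Dict String String) (key : String) : PySem.Dict String String :=
  let ms := marks.filterMap (fun qk => if qk.2 == key then some qk.1 else none)
  match ms with
  | [] => secs
  | p :: _ =>
    let cut := (marks.find? (fun qk => decide (p < qk.1) && (qk.2 != key))).map (fun qk => qk.1)
    let chunk := match cut with
      | some q => PySem.Str.slice comment_block (some p) (some q)
      | none => PySem.Str.slice comment_block (some p) none
    secs.insert (rstripColon key) (PySem.Str.strip chunk)

def extract_section_blocks_alt (comment_block : String) : List (String × String) :=
  if comment_block = "" then (PySem.Dict.empty : PySem.Dict String String).items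
  else (SECTION_KEYS.foldl (extract_step_alt comment_block (marksOf comment_block))
          (PySem.Dict.empty : PySem.Dict String String)).items

-- ===== PRECONDITION & SPEC =====
def Spec_extract_section_blocks (comment_block : String) (out : List (String × String)) : Prop := out = extract_section_blocks_alt comment_block
instance (comment_block : String) (out : List (String × String)) : Decidable (Spec_extract_section_blocks comment_block out) := by unfold Spec_extract_section_blocks; infer_instance

-- ===== CLAIM (what is proved, stated in full; the proofs are below) =====
def Claim_equal_extract_section_blocks : Prop := ∀ (comment_block : String), Dom_extract_section_blocks comment_block → Spec_extract_section_blocks comment_block (extract_section_blocks comment_block)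

-- ===== LEMMAS AND PROOFS =====

theorem foldl_congr_mem' {α β : Type} {f g : β → α → β} {l : List α}
    (h : ∀ x ∈ l, ∀ b, f b x = g b x) : ∀ b, l.foldl f b = l.foldl g b := by
  induction l with
  | nil => intro b; rfl
  | cons a t ih =>
    intro b
    simp only [List.foldl_cons]
    rw [h a (by simp)]
    exact ih (fun x hx b => h x (by simp [hx]) b) (g b a)

theorem filterMap_key_nil {i : Int} {key : String} {t : List String} (p : String → Bool)
    (h : key ∉ t) :
    (t.filter p).filterMap (fun k => if k == key then some i else none) = [] := by
  rw [List.filterMap_eq_nil_iff]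
  intro k hk
  have hne : ¬ (k == key) = true := by
    simp only [beq_iff_eq]
    rintro rfl
    exact h (List.mem_of_mem_filter hk)
  rw [if_neg hne]

theorem filterMap_key_one {i : Int} {key : String} {KEYS : List String} (p : String → Bool)
    (h : KEYS.count key = 1) :
    ((KEYS.filter p).map (fun k => (i, k))).filterMap
      (fun qk => if qk.2 == key then some qk.1 else none)
    = if p key then [i] else [] := by
  rw [List.filterMap_map]
  show (KEYS.filter p).filterMap (fun k => if k == key then some i else none) = _
  induction KEYS with
  | nil => simp at h
  | cons a t ih =>
    by_cases ha : a = key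
    · subst ha
      have h0 : t.count a = 0 := by rw [List.count_cons_self] at h; omega
      have hnt : a ∉ t := List.count_eq_zero.mp h0
      rw [List.filter_cons]
      cases hp : p a
      · simpa [hp] using filterMap_key_nil (i := i) p hnt
      · simpa [hp] using filterMap_key_nil (i := i) p hnt
    · have h1' : t.count key = 1 := by
        rw [List.count_cons] at h
        simpa [beq_iff_eq, ha] using h
      rw [List.filter_cons]
      cases hp : p a
      · exact ih h1'
      · simpa [beq_iff_eq, ha] using ih h1'

theorem flatMap_ite_singleton {α β : Type} (l : List α) (p : α → Bool) (f : α → β) :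
    (l.flatMap (fun i => if p i then [f i] else [])) = (l.filter p).map f := by
  induction l with
  | nil => rfl
  | cons a t ih => cases h : p a <;> simp [List.flatMap_cons, h, ih]

theorem ms_eq (s : String) (key : String) (h1 : SECTION_KEYS.count key = 1) :
    (marksOf s).filterMap (fun qk => if qk.2 == key then some qk.1 else none)
    = ((List.range s.toList.length).filter
        (fun j => PySem.Chars.startswith (s.toList.drop j) key.toList)).map
        (fun j => ((j : Nat) : Int)) := by
  unfold marksOf
  rw [List.filterMap_flatMap]
  have hbody : ∀ i : Nat,
      ((SECTION_KEYS.filter (fun k => PySem.Chars.startswith (s.toList.drop i) k.toList)).map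
        (fun k => ((i : Int), k))).filterMap (fun qk => if qk.2 == key then some qk.1 else none)
      = if PySem.Chars.startswith (s.toList.drop i) key.toList then [((i : Nat) : Int)] else [] :=
    fun i => filterMap_key_one _ h1
  simp only [hbody]
  exact flatMap_ite_singleton _ _ _

theorem head?_filter_range_eq_some {p : Nat → Bool} {n m : Nat} (hm : m < n) (hpm : p m = true)
    (hmin : ∀ i, i < m → p i = false) :
    ((List.range n).filter p).head? = some m := by
  rw [List.head?_filter]
  have hn : n = (m + 1) + (n - (m + 1)) := by omega
  rw [hn, List.range_add, List.find?_append]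
  have h0 : (List.range m).find? p = none := by
    rw [List.find?_eq_none]
    intro i hi
    simp [hmin i (List.mem_range.mp hi)]
  rw [List.range_succ, List.find?_append, h0]
  simp [hpm]

theorem head?_filter_range_eq_none {p : Nat → Bool} {n : Nat} (h : ∀ i, i < n → p i = false) :
    ((List.range n).filter p).head? = none := by
  simp only [List.head?_filter]
  rw [List.find?_eq_none]
  intro i hi
  simp [h i (List.mem_range.mp hi)]

theorem find?_flatMap_fst (s : String) (P : Int → Bool) (Q : String → Bool) (l : List Nat) :
    ((l.flatMap (fun i =>
        (SECTION_KEYS.filter (fun k => PySem.Chars.startswith (s.toList.drop i) k.toList)).map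
          (fun k => ((i : Int), k)))).find? (fun qk => P qk.1 && Q qk.2)).map (fun qk => qk.1)
    = (l.find? (fun i => P ((i : Nat) : Int) &&
        ((SECTION_KEYS.filter
          (fun k => PySem.Chars.startswith (s.toList.drop i) k.toList)).any Q))).map
        (fun i => ((i : Nat) : Int)) := by
  induction l with
  | nil => rfl
  | cons a t ih =>
    rw [List.flatMap_cons, List.find?_append]
    have hinner : ((SECTION_KEYS.filter
          (fun k => PySem.Chars.startswith (s.toList.drop a) k.toList)).map
          (fun k => ((a : Int), k))).find? (fun qk => P qk.1 && Q qk.2)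
        = ((SECTION_KEYS.filter
            (fun k => PySem.Chars.startswith (s.toList.drop a) k.toList)).find?
            (fun k => P ((a : Nat) : Int) && Q k)).map (fun k => ((a : Int), k)) := by
      rw [List.find?_map]
      rfl
    rw [hinner]
    by_cases hP : P ((a : Nat) : Int) = true
    · cases hfq : (SECTION_KEYS.filter
          (fun k => PySem.Chars.startswith (s.toList.drop a) k.toList)).find?
          (fun k => P ((a : Nat) : Int) && Q k) with
      | some k =>
        have hQk : Q k = true := by
          have := List.find?_some hfq
          simpa [hP] using this
        have hany : (SECTION_KEYS.filter
            (fun k => PySem.Chars.startswith (s.toList.drop a) k.toList)).any Q = true :=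
          List.any_eq_true.mpr ⟨k, List.mem_of_find?_eq_some hfq, hQk⟩
        rw [List.find?_cons_of_pos (by simp [hP, hany])]
        simp only [Option.map_some, Option.some_or]
      | none =>
        have hany : (SECTION_KEYS.filter
            (fun k => PySem.Chars.startswith (s.toList.drop a) k.toList)).any Q = false := by
          rw [List.any_eq_false]
          intro k hk
          simpa [hP] using List.find?_eq_none.mp hfq k hk
        rw [List.find?_cons_of_neg (by simp [hany])]
        simpa using ih
    · have hn : (SECTION_KEYS.filter
          (fun k => PySem.Chars.startswith (s.toList.drop a) k.toList)).find?
          (fun k => P ((a : Nat) : Int) && Q k) = none := by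
        rw [List.find?_eq_none]
        intro k _
        simp [hP]
      have hP' : P ((a : Nat) : Int) = false := by simpa using hP
      rw [hn, List.find?_cons_of_neg (by simp [hP'])]
      simpa using ih

theorem cut_eq (s : String) (p : Int) (key : String) :
    ((marksOf s).find? (fun qk => decide (p < qk.1) && (qk.2 != key))).map (fun qk => qk.1)
    = (((List.range s.toList.length).filter
        (fun j => decide (p < ((j : Nat) : Int)) &&
          ((SECTION_KEYS.filter
            (fun k => PySem.Chars.startswith (s.toList.drop j) k.toList)).any
            (fun k => k != key)))).head?).map
        (fun j => ((j : Nat) : Int)) := by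
  rw [List.head?_filter]
  unfold marksOf
  exact find?_flatMap_fst s (fun q => decide (p < q)) (fun k => k != key) _

theorem step_eq (s : String) (key : String) (h1 : SECTION_KEYS.count key = 1)
    (h2 : key ≠ "") (d : PySem.Dict String String) :
    extract_step s d key = extract_step_alt s (marksOf s) d key := by
  have hkl : key.toList ≠ [] := fun h => h2 (String.toList_eq_nil_iff.mp h)
  unfold extract_step extract_step_alt
  rw [ms_eq s key h1]
  simp only [PySem.Str.find_eq, PySem.Str.findFrom_eq]
  by_cases hF : PySem.Chars.find s.toList key.toList = -1
  · have hno : ¬ key.toList <:+: s.toList := (PySem.Chars.find_eq_neg_one_iff _ _).mp hF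
    have hfilter : (List.range s.toList.length).filter
        (fun j => PySem.Chars.startswith (s.toList.drop j) key.toList) = [] := by
      rw [List.filter_eq_nil_iff]
      intro j _ hsw
      exact hno ((PySem.Chars.isIn_iff_infix _ _).mp
        ((PySem.Chars.exists_prefix_drop_iff_isIn _ _).mp
          ⟨j, (PySem.Chars.startswith_iff _ _).mp hsw⟩))
    rw [hfilter]
    simp [hF]
  · have hF0 : 0 ≤ PySem.Chars.find s.toList key.toList := by
      have := PySem.Chars.neg_one_le_find s.toList key.toList
      omega
    obtain ⟨hpre, hmin⟩ := PySem.Chars.find_spec hF0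
    set F := PySem.Chars.find s.toList key.toList with hFdef
    set m := F.toNat with hmdef
    have hFm : F = (m : Int) := (Int.toNat_of_nonneg hF0).symm
    have hmlt : m < s.toList.length := by
      by_contra hc
      rw [not_lt] at hc
      rw [List.drop_eq_nil_of_le hc] at hpre
      exact hkl (List.prefix_nil.mp hpre)
    have hm1 : m + 1 ≤ s.toList.length := hmlt
    have hhead := head?_filter_range_eq_some
      (p := fun j => PySem.Chars.startswith (s.toList.drop j) key.toList) hmlt
      ((PySem.Chars.startswith_iff _ _).mpr hpre)
      (fun i hi => by
        rw [Bool.eq_false_iff]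
        intro ht
        exact hmin i hi ((PySem.Chars.startswith_iff _ _).mp ht))
    obtain ⟨tl, htl⟩ := List.head?_eq_some_iff.mp hhead
    rw [htl, List.map_cons, if_neg hF]
    dsimp only
    rw [cut_eq s ((m : Nat) : Int) key]
    have hF1 : F + 1 = ((m + 1 : Nat) : Int) := by rw [hFm]; push_cast; ring
    rw [hF1]
    -- occurrence of another key at j ≥ m+1 gives an infix of the (m+1)-suffix
    have hinfix : ∀ (k : String) (j : Nat), m < j → k.toList <+: s.toList.drop j →
        k.toList <:+: s.toList.drop (m + 1) := by
      intro k j hj hp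
      apply (PySem.Chars.isIn_iff_infix _ _).mp
      apply (PySem.Chars.exists_prefix_drop_iff_isIn _ _).mp
      refine ⟨j - (m + 1), ?_⟩
      rw [List.drop_drop]
      have : m + 1 + (j - (m + 1)) = j := by omega
      rw [this]
      exact hp
    by_cases hNPe : (SECTION_KEYS.filter
        (fun k => (k != key) && (PySem.Chars.findFrom s.toList k.toList ((m + 1 : Nat) : Int) != -1))).map
        (fun k => PySem.Chars.findFrom s.toList k.toList ((m + 1 : Nat) : Int)) = ([] : List Int)
    · -- no other key after m : both sides slice to the end
      have hfil : (SECTION_KEYS.filter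
          (fun k => (k != key) && (PySem.Chars.findFrom s.toList k.toList ((m + 1 : Nat) : Int) != -1))) = [] :=
        List.map_eq_nil_iff.mp hNPe
      have hnok : ∀ k ∈ SECTION_KEYS, k ≠ key →
          PySem.Chars.findFrom s.toList k.toList ((m + 1 : Nat) : Int) = -1 := by
        intro k hk hkne
        by_contra hcon
        have : k ∈ (SECTION_KEYS.filter
            (fun k => (k != key) && (PySem.Chars.findFrom s.toList k.toList ((m + 1 : Nat) : Int) != -1))) :=
          List.mem_filter.mpr ⟨hk, by
            rw [Bool.and_eq_true]
            exact ⟨bne_iff_ne.mpr hkne, bne_iff_ne.mpr hcon⟩⟩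
        rw [hfil] at this
        exact absurd this (List.not_mem_nil)
      have hoptB : (((List.range s.toList.length).filter
          (fun j => decide (((m : Nat) : Int) < ((j : Nat) : Int)) &&
            ((SECTION_KEYS.filter
              (fun k => PySem.Chars.startswith (s.toList.drop j) k.toList)).any
              (fun k => k != key)))).head?) = none := by
        apply head?_filter_range_eq_none
        intro j hj
        rw [Bool.eq_false_iff]
        intro ht
        rw [Bool.and_eq_true] at ht
        obtain ⟨hlt, hany⟩ := ht
        have hmj : m < j := by
          have := of_decide_eq_true hlt
          exact_mod_cast this
        obtain ⟨k1, hk1f, hk1q⟩ := List.any_eq_true.mp hany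
        obtain ⟨hk1mem, hk1sw⟩ := List.mem_filter.mp hk1f
        have hk1ne : k1 ≠ key := by simpa using hk1q
        have := hnok k1 hk1mem hk1ne
        rw [PySem.Chars.findFrom_natCast_eq_neg_one_iff _ _ (m + 1) hm1] at this
        exact this (hinfix k1 j hmj ((PySem.Chars.startswith_iff _ _).mp hk1sw))
      rw [hNPe, hoptB]
      simp [hFm]
    · -- some other key after m : both sides cut at the same minimal position
      cases hmv : PySem.List.min? ((SECTION_KEYS.filter
          (fun k => (k != key) && (PySem.Chars.findFrom s.toList k.toList ((m + 1 : Nat) : Int) != -1))).map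
          (fun k => PySem.Chars.findFrom s.toList k.toList ((m + 1 : Nat) : Int))) (fun x => x) with
      | none => exact absurd ((PySem.List.min?_eq_none_iff _ _).mp hmv) hNPe
      | some mv =>
        obtain ⟨k0, hk0f, hk0v⟩ := List.mem_map.mp (PySem.List.min?_mem hmv)
        obtain ⟨hk0mem, hk0p⟩ := List.mem_filter.mp hk0f
        rw [Bool.and_eq_true] at hk0p
        have hk0ne : k0 ≠ key := by simpa using hk0p.1
        have hk0find : PySem.Chars.findFrom s.toList k0.toList ((m + 1 : Nat) : Int) ≠ -1 := by
          simpa using hk0p.2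
        obtain ⟨hmv1, hmvpre, hmvmin⟩ :=
          PySem.Chars.findFrom_natCast_spec s.toList k0.toList (m + 1) hm1 hk0find
        rw [hk0v] at hmv1 hmvpre hmvmin
        have hmvw : mv = ((mv.toNat : Nat) : Int) :=
          (Int.toNat_of_nonneg (le_trans (by exact_mod_cast Nat.zero_le (m + 1)) hmv1)).symm
        have hk0l : k0.toList ≠ [] := by
          have hall : ∀ k ∈ SECTION_KEYS, k ≠ "" := by decide
          exact fun h => hall k0 hk0mem (String.toList_eq_nil_iff.mp h)
        have hwlt : mv.toNat < s.toList.length := by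
          by_contra hc
          rw [not_lt] at hc
          rw [List.drop_eq_nil_of_le hc] at hmvpre
          exact hk0l (List.prefix_nil.mp hmvpre)
        have hmw : m < mv.toNat := by omega
        have hoptB : (((List.range s.toList.length).filter
            (fun j => decide (((m : Nat) : Int) < ((j : Nat) : Int)) &&
              ((SECTION_KEYS.filter
                (fun k => PySem.Chars.startswith (s.toList.drop j) k.toList)).any
                (fun k => k != key)))).head?) = some mv.toNat := by
          apply head?_filter_range_eq_some hwlt
          · rw [Bool.and_eq_true]
            constructor
            · exact decide_eq_true (by exact_mod_cast hmw)
            · exact List.any_eq_true.mpr ⟨k0,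
                List.mem_filter.mpr ⟨hk0mem, (PySem.Chars.startswith_iff _ _).mpr hmvpre⟩,
                by simp [hk0ne]⟩
          · intro i hi
            rw [Bool.eq_false_iff]
            intro ht
            rw [Bool.and_eq_true] at ht
            obtain ⟨hlt, hany⟩ := ht
            have hmi : m < i := by
              have := of_decide_eq_true hlt
              exact_mod_cast this
            obtain ⟨k1, hk1f, hk1q⟩ := List.any_eq_true.mp hany
            obtain ⟨hk1mem, hk1sw⟩ := List.mem_filter.mp hk1f
            have hk1ne : k1 ≠ key := by simpa using hk1q
            have hk1pre : k1.toList <+: s.toList.drop i := (PySem.Chars.startswith_iff _ _).mp hk1sw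
            have hrne : PySem.Chars.findFrom s.toList k1.toList ((m + 1 : Nat) : Int) ≠ -1 := by
              rw [Ne, PySem.Chars.findFrom_natCast_eq_neg_one_iff _ _ (m + 1) hm1]
              intro hni
              exact hni (hinfix k1 i hmi hk1pre)
            obtain ⟨hr1, _, hrmin⟩ :=
              PySem.Chars.findFrom_natCast_spec s.toList k1.toList (m + 1) hm1 hrne
            have hrle : (PySem.Chars.findFrom s.toList k1.toList ((m + 1 : Nat) : Int)).toNat ≤ i := by
              by_contra hc
              rw [not_le] at hc
              exact hrmin i (by omega) hc hk1pre
            have hrNP : PySem.Chars.findFrom s.toList k1.toList ((m + 1 : Nat) : Int) ∈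
                ((SECTION_KEYS.filter
                  (fun k => (k != key) && (PySem.Chars.findFrom s.toList k.toList ((m + 1 : Nat) : Int) != -1))).map
                  (fun k => PySem.Chars.findFrom s.toList k.toList ((m + 1 : Nat) : Int))) :=
              List.mem_map.mpr ⟨k1, List.mem_filter.mpr ⟨hk1mem, by
                rw [Bool.and_eq_true]
                exact ⟨bne_iff_ne.mpr hk1ne, bne_iff_ne.mpr hrne⟩⟩, rfl⟩
            have hminle := PySem.List.min?_isMin hmv _ hrNP
            simp only at hminle
            have hr0 : 0 ≤ PySem.Chars.findFrom s.toList k1.toList ((m + 1 : Nat) : Int) :=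
              le_trans (by exact_mod_cast Nat.zero_le (m + 1)) hr1
            omega
        rw [hoptB]
        have hmvne : mv ≠ -1 := by omega
        have hnall : ¬(∀ a ∈ SECTION_KEYS, ¬a = key →
            PySem.Chars.findFrom s.toList a.toList ((m + 1 : Nat) : Int) = -1) :=
          fun hall => hk0find (hall k0 hk0mem hk0ne)
        push_cast at hnall
        simp [hmvne, hFm, ← hmvw, hnall]

-- ===== VERDICT (by name: the statement is the Claim_ definition above) =====
theorem extract_section_blocks_spec : Claim_equal_extract_section_blocks := by
  intro s _
  unfold Spec_extract_section_blocks extract_section_blocks extract_section_blocks_alt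
  by_cases hs : s = ""
  · simp [hs]
  · simp only [hs, if_false]
    congr 1
    apply foldl_congr_mem'
    intro key hkey d
    have hck : SECTION_KEYS.count key = 1 ∧ key ≠ "" := by
      have : ∀ k ∈ SECTION_KEYS, SECTION_KEYS.count k = 1 ∧ k ≠ "" := by decide
      exact this key hkey
    exact step_eq s key hck.1 hck.2 d
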